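-- pv_equiv track=rewrite | github.com/daviddwlee84/LeetCode | Contest/LeetCodeWeeklyContest/WeeklyContest340/1/Naive.py | diagonalPrime
-- ===== SOURCE A (Python) =====
-- from typing import List
--
-- def diagonalPrime(nums: List[List[int]]) -> int:
--     def is_prime(n: int) -> bool:
--         if n < 2:
--             return False
--         if n % 2 == 0:
--             return n == 2  # return False
--         k = 3
--         while k * k <= n:
--             if n % k == 0:
--                 return False
--             k += 2
--         return True
--     ans = 0
--     for i in range(len(nums)):
--         if is_prime(nums[i][i]):
--             ans = max(ans, nums[i][i])
--         if is_prime(nums[i][len(nums) - i - 1]):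
--             ans = max(ans, nums[i][len(nums) - i - 1])
--     return ans
-- ===== SOURCE B (Python) =====
-- from typing import List
--
-- def diagonalPrime(nums: List[List[int]]) -> int:
--     def is_prime(n: int) -> bool:
--         if n < 2:
--             return False
--         if n % 2 == 0:
--             return n == 2  # return False
--         k = 3
--         while k * k <= n:
--             if n % k == 0:
--                 return False
--             k += 2
--         return True
--     n = len(nums)
--     cands = []
--     for i, row in enumerate(nums):
--         cands.append(row[i])
--         cands.append(row[n - 1 - i])
--     for v in sorted(cands, reverse=True):
--         if is_prime(v):
--             return v
--     return 0
-- ===== Notes on version B (the rewrite author's own statement) =====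
-- stated objective: alternative
-- what changed: B gathers all diagonal values into a list, sorts it descending and returns the first prime found (default 0), replacing A's interleaved test-and-running-max loop.
import Mathlib
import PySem

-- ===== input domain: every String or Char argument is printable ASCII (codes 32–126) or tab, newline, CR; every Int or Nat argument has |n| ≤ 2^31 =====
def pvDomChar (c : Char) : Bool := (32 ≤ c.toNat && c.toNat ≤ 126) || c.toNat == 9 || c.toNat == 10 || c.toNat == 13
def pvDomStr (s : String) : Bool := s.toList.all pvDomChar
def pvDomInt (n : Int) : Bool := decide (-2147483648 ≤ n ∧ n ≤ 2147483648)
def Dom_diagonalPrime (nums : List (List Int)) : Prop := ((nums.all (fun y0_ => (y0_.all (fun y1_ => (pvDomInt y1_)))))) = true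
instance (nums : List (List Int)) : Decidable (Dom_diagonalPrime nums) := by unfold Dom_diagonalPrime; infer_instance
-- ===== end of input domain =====

-- B gathers the diagonal values, sorts them descending and returns the first prime (0 if none),
-- instead of A's interleaved test-and-running-max loop. Both Python sources carry the identical
-- is_prime helper, ported once below and used by both ports.

-- ===== PORT A =====
-- trial-division loop 'k = 3; while k * k <= n: if n % k == 0: return False; k += 2; return True'
def primeLoop (n : Int) (k : Int) (hk : 3 ≤ k) : Bool :=
  if h : k * k ≤ n then
    if PySem.Int.mod n k = 0 then false
    else primeLoop n (k + 2) (by omega)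
  else true
termination_by (n - k).toNat
decreasing_by
  have h3 : 3 * k ≤ k * k := by nlinarith
  omega

def isPrime (n : Int) : Bool :=
  if n < 2 then false
  else if PySem.Int.mod n 2 = 0 then n == 2
  else primeLoop n 3 (by omega)

def diagonalPrime (nums : List (List Int)) : Int :=
  (PySem.List.pyRange 0 (nums.length : Int) 1).foldl
    (fun ans i =>
      let row := PySem.List.pyGetD nums i []
      let a := PySem.List.pyGetD row i 0
      let ans := if isPrime a then max ans a else ans
      let b := PySem.List.pyGetD row ((nums.length : Int) - i - 1) 0
      if isPrime b then max ans b else ans)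
    0

-- ===== PORT B =====
-- 'for v in sorted(cands, reverse=True): if is_prime(v): return v / return 0'
def firstPrime : List Int → Int
  | [] => 0
  | v :: rest => if isPrime v then v else firstPrime rest

def diagonalPrime_alt (nums : List (List Int)) : Int :=
  let n : Int := nums.length
  let cands := (PySem.List.enumerate nums).foldl
    (fun acc p => acc ++ [PySem.List.pyGetD p.2 p.1 0, PySem.List.pyGetD p.2 (n - 1 - p.1) 0]) []
  firstPrime (PySem.List.sorted cands (fun x => x) true)

-- ===== PRECONDITION & SPEC =====
-- Pre_ excludes exactly the inputs on which the Python A raises IndexError: some row i is too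
-- short for index i or index len(nums)-1-i (B raises on the same inputs).
def Pre_diagonalPrime (nums : List (List Int)) : Prop :=
  ∀ i : Fin nums.length, i.val < (nums.get i).length ∧ nums.length - 1 - i.val < (nums.get i).length
instance (nums : List (List Int)) : Decidable (Pre_diagonalPrime nums) := by
  unfold Pre_diagonalPrime; infer_instance

def pvWitness_diagonalPrime : List (List Int) := [[2, 6], [9, 11]]

def Spec_diagonalPrime (nums : List (List Int)) (out : Int) : Prop := out = diagonalPrime_alt nums
instance (nums : List (List Int)) (out : Int) : Decidable (Spec_diagonalPrime nums out) := by unfold Spec_diagonalPrime; infer_instance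

-- ===== CLAIM (what is proved, stated in full; the proofs are below) =====
def Claim_equal_diagonalPrime : Prop := ∀ (nums : List (List Int)), Dom_diagonalPrime nums → Pre_diagonalPrime nums → Spec_diagonalPrime nums (diagonalPrime nums)

-- ===== LEMMAS AND PROOFS =====

-- the accumulator step of A's loop, one candidate at a time
def pstep (ans c : Int) : Int := if isPrime c then max ans c else ans

-- one row's contribution, as A's loop body performs it
def rowStep (L : Int) (ans i : Int) (row : List Int) : Int :=
  pstep (pstep ans (PySem.List.pyGetD row i 0)) (PySem.List.pyGetD row (L - 1 - i) 0)

lemma isPrime_two_le {n : Int} (h : isPrime n = true) : 2 ≤ n := by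
  by_contra hn
  rw [isPrime, if_pos (by omega : n < 2)] at h
  exact Bool.false_ne_true h

lemma pstep_left_comm (a b c : Int) : pstep (pstep a b) c = pstep (pstep a c) b := by
  unfold pstep; split_ifs <;> simp [max_comm, max_left_comm]

-- the fold is fixed once the accumulator dominates every remaining element
lemma pstep_foldl_of_le (l : List Int) (a : Int) (h : ∀ c ∈ l, c ≤ a) :
    l.foldl pstep a = a := by
  induction l with
  | nil => rfl
  | cons x t ih =>
      have hx : x ≤ a := h x (by simp)
      have hs : pstep a x = a := by
        unfold pstep; split_ifs <;> omega
      simp only [List.foldl_cons, hs]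
      exact ih (fun c hc => h c (by simp [hc]))

-- on a descending list the fold from 0 is the first prime
lemma pstep_foldl_sorted (l : List Int) (h : l.Pairwise (fun a b => b ≤ a)) :
    l.foldl pstep 0 = firstPrime l := by
  induction l with
  | nil => rfl
  | cons v t ih =>
      rcases List.pairwise_cons.mp h with ⟨hv, ht⟩
      by_cases hp : isPrime v = true
      · have h2 : 2 ≤ v := isPrime_two_le hp
        simp only [List.foldl_cons, firstPrime, pstep, hp, if_pos]
        have hm : max 0 v = v := by omega
        rw [hm]
        exact pstep_foldl_of_le t v hv
      · simp only [List.foldl_cons, firstPrime, pstep, hp, Bool.false_eq_true, if_false]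
        exact ih ht

lemma pstep_foldl_perm {l₁ l₂ : List Int} (h : l₁.Perm l₂) (a : Int) :
    l₁.foldl pstep a = l₂.foldl pstep a :=
  h.foldl_eq' (fun x _ y _ z => pstep_left_comm z x y) a

-- the candidate list B builds (same expression as in diagonalPrime_alt)
def candList (nums : List (List Int)) : List Int :=
  (PySem.List.enumerate nums).foldl
    (fun acc p => acc ++ [PySem.List.pyGetD p.2 p.1 0,
                          PySem.List.pyGetD p.2 ((nums.length : Int) - 1 - p.1) 0]) []

lemma pyGetD_cons_pos {α : Type} (x : α) (t : List α) (j : Int) (d : α) (h : 1 ≤ j) :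
    PySem.List.pyGetD (x :: t) j d = PySem.List.pyGetD t (j - 1) d := by
  obtain ⟨m, rfl⟩ : ∃ m : Nat, j = ((m + 1 : Nat) : Int) := ⟨(j - 1).toNat, by omega⟩
  have h2 : ((m + 1 : Nat) : Int) - 1 = ((m : Nat) : Int) := by omega
  rw [h2, PySem.List.pyGetD_natCast, PySem.List.pyGetD_natCast]
  simp

-- index loop over range(s, s+len(xs)) reading xs[i] is the fold over enumerate(xs, s)
lemma foldl_pyRange_enum (F : Int → Int → List Int → Int) :
    ∀ (xs : List (List Int)) (s a : Int),
      (PySem.List.pyRange s (s + (xs.length : Int)) 1).foldl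
        (fun ans i => F ans i (PySem.List.pyGetD xs (i - s) [])) a
      = (PySem.List.enumerate xs s).foldl (fun ans p => F ans p.1 p.2) a := by
  intro xs
  induction xs with
  | nil =>
      intro s a
      simp [PySem.List.enumerate_nil, PySem.List.pyRange_one_eq_nil]
  | cons x t ih =>
      intro s a
      have hcons : PySem.List.pyRange s (s + ((x :: t).length : Int)) 1
          = s :: PySem.List.pyRange (s + 1) (s + ((x :: t).length : Int)) 1 :=
        PySem.List.pyRange_one_cons (by simp)
      rw [hcons, PySem.List.enumerate_cons]
      simp only [List.foldl_cons, sub_self, PySem.List.pyGetD_zero_cons]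
      have harith : s + ((x :: t).length : Int) = (s + 1) + (t.length : Int) := by
        simp; omega
      rw [harith]
      have hc := PySem.List.foldl_congr_mem
        (PySem.List.pyRange (s + 1) ((s + 1) + (t.length : Int)) 1)
        (fun ans i => F ans i (PySem.List.pyGetD (x :: t) (i - s) []))
        (fun ans i => F ans i (PySem.List.pyGetD t (i - (s + 1)) []))
        (F a s x)
        (by
          intro acc i hi
          have hs : s + 1 ≤ i := (PySem.List.mem_pyRange_one.mp hi).1
          simp only
          rw [pyGetD_cons_pos x t (i - s) [] (by omega)]
          congr 2
          omega)
      rw [hc]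
      exact ih (s + 1) _

lemma foldl_pstep_flatMap (g : Int × List Int → List Int) :
    ∀ (l : List (Int × List Int)) (a : Int),
      (l.flatMap g).foldl pstep a = l.foldl (fun ans p => (g p).foldl pstep ans) a := by
  intro l
  induction l with
  | nil => intro a; rfl
  | cons x t ih => intro a; simp only [List.flatMap_cons, List.foldl_append, List.foldl_cons, ih]

lemma A_eq_fold_cand (nums : List (List Int)) :
    diagonalPrime nums = (candList nums).foldl pstep 0 := by
  have h1 : diagonalPrime nums
      = (PySem.List.pyRange 0 (0 + (nums.length : Int)) 1).foldl
          (fun ans i => rowStep (nums.length : Int) ans i (PySem.List.pyGetD nums (i - 0) [])) 0 := by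
    unfold diagonalPrime rowStep pstep
    have e0 : (0 : Int) + (nums.length : Int) = (nums.length : Int) := by ring
    rw [e0]
    apply PySem.List.foldl_congr_mem
    intro acc i _
    have harr : (nums.length : Int) - 1 - i = (nums.length : Int) - i - 1 := by ring
    simp only [sub_zero, harr]
  rw [h1, foldl_pyRange_enum]
  unfold candList
  rw [PySem.List.foldl_append_eq_flatMap]
  rw [List.nil_append, foldl_pstep_flatMap]
  rfl

lemma B_eq (nums : List (List Int)) :
    diagonalPrime_alt nums = firstPrime (PySem.List.sorted (candList nums) (fun x => x) true) :=
  rfl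

-- ===== VERDICT (by name: the statement is the Claim_ definition above) =====
theorem diagonalPrime_spec : Claim_equal_diagonalPrime := by
  intro nums _ _
  unfold Spec_diagonalPrime
  rw [B_eq, A_eq_fold_cand,
    pstep_foldl_perm (PySem.List.sorted_perm (candList nums) (fun x => x) true).symm]
  exact pstep_foldl_sorted _
    (by simpa using PySem.List.sorted_pairwise_rev (candList nums) (fun x => x))
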